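-- pv_equiv track=rewrite | github.com/EmYassir/multi_modal_personality_prediction_project | datavengers/model/personality/data_util.py | get_word_context
-- ===== SOURCE A (Python) =====
-- def get_word_context(tokenized_sentence, index, window):
--     ret=[]
--     size = len(tokenized_sentence)
--     for i in range(max(index - window, 0), min(index + window + 1, size)):
--         if (i == index):
--           continue
--         ret.append(tokenized_sentence[i])
--     return ret
-- ===== SOURCE B (Python) =====
-- def get_word_context(tokenized_sentence, index, window):
--     return [tok for i, tok in enumerate(tokenized_sentence)
--             if i != index and index - window <= i <= index + window]
-- ===== Notes on version B (the rewrite author's own statement) =====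
-- stated objective: alternative
-- what changed: Replaces the loop over a clamped index range (with in-loop skip and per-index subscripting) by a single filtering pass over enumerate(tokenized_sentence), keeping tokens whose position differs from index by at most window; no bounds clamping or indexed access at all.
import Mathlib
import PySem

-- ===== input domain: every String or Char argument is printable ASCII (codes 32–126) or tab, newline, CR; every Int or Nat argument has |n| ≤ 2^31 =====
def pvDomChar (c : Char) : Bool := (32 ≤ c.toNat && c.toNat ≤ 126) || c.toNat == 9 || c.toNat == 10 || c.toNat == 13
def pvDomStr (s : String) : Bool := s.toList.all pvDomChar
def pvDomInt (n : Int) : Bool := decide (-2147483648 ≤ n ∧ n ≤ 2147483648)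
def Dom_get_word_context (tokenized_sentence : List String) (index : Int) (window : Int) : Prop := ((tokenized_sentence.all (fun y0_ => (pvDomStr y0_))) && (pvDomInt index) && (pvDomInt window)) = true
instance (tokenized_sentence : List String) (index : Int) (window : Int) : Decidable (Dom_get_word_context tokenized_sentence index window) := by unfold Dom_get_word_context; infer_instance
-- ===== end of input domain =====

-- B replaces A's loop over a clamped index range by one filtering pass over enumerate, keeping tokens within distance window of index; same value, different traversal.

-- ===== PORT A =====
-- Loop 'for i in range(max(index-window,0), min(index+window+1,size))' appending
-- tokenized_sentence[i] unless i == index.  Every loop index i satisfies 0 ≤ i < size,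
-- so 'pyGetD … ""' is exactly Python's tokenized_sentence[i] here (never the default).
def get_word_context (tokenized_sentence : List String) (index : Int) (window : Int) : List String :=
  let size : Int := tokenized_sentence.length
  (PySem.List.pyRange (max (index - window) 0) (min (index + window + 1) size) 1).foldl
    (fun ret i => if i = index then ret else ret ++ [PySem.List.pyGetD tokenized_sentence i ""])
    []

-- ===== PORT B =====
-- '[tok for i, tok in enumerate(tokenized_sentence) if i != index and index - window <= i <= index + window]'
def get_word_context_alt (tokenized_sentence : List String) (index : Int) (window : Int) : List String :=
  (PySem.List.enumerate tokenized_sentence 0).filterMap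
    (fun p => if p.1 ≠ index ∧ index - window ≤ p.1 ∧ p.1 ≤ index + window then some p.2 else none)

-- ===== PRECONDITION & SPEC =====
def Spec_get_word_context (tokenized_sentence : List String) (index : Int) (window : Int) (out : List String) : Prop := out = get_word_context_alt tokenized_sentence index window
instance (tokenized_sentence : List String) (index : Int) (window : Int) (out : List String) : Decidable (Spec_get_word_context tokenized_sentence index window out) := by unfold Spec_get_word_context; infer_instance

-- ===== CLAIM (what is proved, stated in full; the proofs are below) =====
def Claim_equal_get_word_context : Prop := ∀ (tokenized_sentence : List String) (index : Int) (window : Int), Dom_get_word_context tokenized_sentence index window → Spec_get_word_context tokenized_sentence index window (get_word_context tokenized_sentence index window)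

-- ===== LEMMAS AND PROOFS =====

-- A comprehension 'some h j if P j else none' is filter-then-map.
theorem pv_filterMap_if {α β : Type} (P : α → Prop) [DecidablePred P] (h : α → β) :
    ∀ (l : List α), l.filterMap (fun x => if P x then some (h x) else none) =
      (l.filter (fun x => decide (P x))).map h := by
  intro l
  induction l with
  | nil => rfl
  | cons x xs ih =>
    by_cases hx : P x <;> simp [List.filterMap_cons, List.filter_cons, hx, ih]

theorem get_word_context_eq (ts : List String) (index window : Int) :
    get_word_context ts index window = get_word_context_alt ts index window := by
  simp only [get_word_context, get_word_context_alt]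
  set size : Int := (ts.length : Int) with hsize
  set lo : Int := max (index - window) 0 with hlo
  set hi : Int := min (index + window + 1) size with hhi
  have hlo0 : 0 ≤ lo := by omega
  -- the A-side loop body, pointwise on the range, is the comprehension's test
  have hfun : ∀ (r : List String) (i : Int), i ∈ PySem.List.pyRange lo hi 1 →
      (if i = index then r else r ++ [PySem.List.pyGetD ts i ""]) =
      (if (i ≠ index ∧ index - window ≤ i ∧ i ≤ index + window) then r ++ [PySem.List.pyGetD ts i ""] else r) := by
    intro r i hi'
    have hmem := PySem.List.mem_pyRange_one.mp hi'
    by_cases h : i = index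
    · rw [if_pos h, if_neg (by omega)]
    · rw [if_neg h, if_pos ⟨h, by omega, by omega⟩]
  -- A: fold with skip = filter-then-map over the clamped range.
  have hA : (PySem.List.pyRange lo hi 1).foldl
      (fun ret i => if i = index then ret else ret ++ [PySem.List.pyGetD ts i ""]) [] =
      ((PySem.List.pyRange lo hi 1).filter
        (fun i => decide (i ≠ index ∧ index - window ≤ i ∧ i ≤ index + window))).map
        (fun i => PySem.List.pyGetD ts i "") := by
    rw [PySem.List.foldl_congr_mem _ _
      (fun ret i => if (i ≠ index ∧ index - window ≤ i ∧ i ≤ index + window) then ret ++ [PySem.List.pyGetD ts i ""] else ret) []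
      (fun r i h => hfun r i h)]
    exact PySem.List.foldl_append_ite _ _ _ _
  rw [hA]
  -- B: enumerate as a map over pyRange 0 size, then comprehension = filter-then-map.
  rw [PySem.List.enumerate_eq_map_pyRange (d := ""), List.filterMap_map]
  rw [show ((fun p : Int × String => if p.1 ≠ index ∧ index - window ≤ p.1 ∧ p.1 ≤ index + window then some p.2 else none) ∘
        (fun j => (j, PySem.List.pyGetD ts j ""))) =
      (fun j => if j ≠ index ∧ index - window ≤ j ∧ j ≤ index + window then some (PySem.List.pyGetD ts j "") else none)
    from rfl]
  rw [pv_filterMap_if (fun j => j ≠ index ∧ index - window ≤ j ∧ j ≤ index + window)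
    (fun j => PySem.List.pyGetD ts j "")]
  rw [show PySem.List.len ts = size from by simp [hsize]]
  -- It remains to equate the two filtered ranges.
  congr 1
  by_cases hle : lo ≤ hi
  · -- split 0..size at lo and hi; the outer parts filter to nil
    have hhs : hi ≤ size := by omega
    rw [PySem.List.pyRange_one_append 0 lo size hlo0 (by omega),
        PySem.List.pyRange_one_append lo hi size hle hhs,
        List.filter_append, List.filter_append]
    have h1 : (PySem.List.pyRange 0 lo 1).filter
        (fun i => decide (i ≠ index ∧ index - window ≤ i ∧ i ≤ index + window)) = [] := by
      rw [List.filter_eq_nil_iff]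
      intro j hj
      have := PySem.List.mem_pyRange_one.mp hj
      simp only [decide_eq_true_eq]
      omega
    have h2 : (PySem.List.pyRange hi size 1).filter
        (fun i => decide (i ≠ index ∧ index - window ≤ i ∧ i ≤ index + window)) = [] := by
      rw [List.filter_eq_nil_iff]
      intro j hj
      have := PySem.List.mem_pyRange_one.mp hj
      simp only [decide_eq_true_eq]
      omega
    rw [h1, h2, List.nil_append, List.append_nil]
  · -- empty window intersection: both filters are nil
    rw [PySem.List.pyRange_one_eq_nil (by omega), List.filter_nil]
    symm
    rw [List.filter_eq_nil_iff]
    intro j hj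
    have := PySem.List.mem_pyRange_one.mp hj
    simp only [decide_eq_true_eq]
    omega

-- ===== VERDICT (by name: the statement is the Claim_ definition above) =====
theorem get_word_context_spec : Claim_equal_get_word_context := by
  intro ts index window _
  unfold Spec_get_word_context
  exact get_word_context_eq ts index window
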